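-- pv_equiv track=rewrite | github.com/sundeepansen/kriya | dna_mapping.py | decode_from_dna
-- ===== SOURCE A (Python) =====
-- def generate_dna_mapping():
--     dna_mapping = {}
--
--     min_ascii = 0
--     max_ascii = 127
--
--     for i in range(min_ascii, max_ascii):
--         character = chr(i)
--         dna_sequence = ""
--
--         # Convert ASCII character to binary
--         binary = bin(i)[2:].zfill(7)
--
--         # Map binary digits to DNA bases
--         for bit in binary:
--             if bit == '0':
--                 dna_sequence += 'A'
--             else:
--                 dna_sequence += 'T'
--
--         dna_mapping[character] = dna_sequence
--
--     return dna_mapping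
--
-- def decode_from_dna(encoded_dna):
--     # Generate the DNA mapping dictionary
--     dna_mapping = generate_dna_mapping()
--
--     decoded_text = ""
--     for i in range(0, len(encoded_dna), 7):
--         dna_sequence = encoded_dna[i:i+7]
--         found = False
--
--         for char, dna in dna_mapping.items():
--             if dna == dna_sequence:
--                 decoded_text += char
--                 found = True
--                 break
--
--         if not found:
--             # Handle unknown DNA sequences
--             decoded_text += "?"
--
--     return decoded_text
-- ===== SOURCE B (Python) =====
-- def decode_from_dna(encoded_dna):
--     pieces = []
--     for i in range(0, len(encoded_dna), 7):
--         block = encoded_dna[i:i+7]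
--         if len(block) == 7 and all(c in 'AT' for c in block):
--             v = 0
--             for c in block:
--                 v = 2 * v + (1 if c == 'T' else 0)
--             pieces.append(chr(v) if v <= 126 else '?')
--         else:
--             pieces.append('?')
--     return ''.join(pieces)
-- ===== Notes on version B (the rewrite author's own statement) =====
-- stated objective: faster
-- what changed: B decodes each 7-character block by direct binary arithmetic (A/T read as bits, chr(value) when the value is a mapped code, i.e. at most 126), instead of A's building a 127-entry char-to-DNA dictionary and linearly scanning it for every block.
import Mathlib
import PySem

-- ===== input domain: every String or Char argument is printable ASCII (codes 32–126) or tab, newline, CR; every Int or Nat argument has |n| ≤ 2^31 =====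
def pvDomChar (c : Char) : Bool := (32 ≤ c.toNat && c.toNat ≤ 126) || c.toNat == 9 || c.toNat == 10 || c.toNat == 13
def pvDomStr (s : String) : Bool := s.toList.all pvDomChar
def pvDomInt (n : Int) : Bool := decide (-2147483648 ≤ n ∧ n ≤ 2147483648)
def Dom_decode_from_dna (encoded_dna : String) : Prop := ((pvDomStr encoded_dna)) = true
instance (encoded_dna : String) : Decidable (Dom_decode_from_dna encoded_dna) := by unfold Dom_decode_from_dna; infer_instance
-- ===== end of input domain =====

-- B decodes each 7-character block arithmetically (A/T as binary digits) instead of building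
-- A's 127-entry char→DNA dictionary and linearly searching it for every block; simpler and faster
-- by a constant factor (no table build, no inner scan).

-- ===== PORT A =====
-- bin(i)[2:] for i ≥ 0 is Nat.toDigits 2 i (most-significant bit first); .zfill(7) is PySem.Chars.zfill
def binZfill7 (i : Nat) : List Char := PySem.Chars.zfill (Nat.toDigits 2 i) 7

-- the inner 'for bit in binary' loop of generate_dna_mapping
def dnaOfBits (bits : List Char) : List Char :=
  bits.foldl (fun s bit => if bit = '0' then s ++ ['A'] else s ++ ['T']) []

def generate_dna_mapping : PySem.Dict Char (List Char) :=
  (PySem.List.pyRange 0 127 1).foldl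
    (fun d i => d.insert (Char.ofNat i.toNat) (dnaOfBits (binZfill7 i.toNat)))
    (PySem.Dict.mk [])

-- the inner 'for char, dna in dna_mapping.items(): … break' loop: first entry whose dna equals seq
def findChar : List (Char × List Char) → List Char → Option Char
  | [], _ => none
  | (ch, dna) :: rest, seq => if dna = seq then some ch else findChar rest seq

def decode_from_dna (encoded_dna : String) : String :=
  let dna_mapping := generate_dna_mapping
  let cs := encoded_dna.toList
  let decoded := (PySem.List.pyRange 0 cs.length 7).foldl
    (fun acc i =>
      match findChar dna_mapping.items (PySem.List.slice cs (some i) (some (i + 7))) with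
      | some ch => acc ++ [ch]
      | none => acc ++ ['?']) []
  String.ofList decoded

-- ===== PORT B =====
-- the 'v = 2*v + (c == 'T')' loop of Source B
def blkVal (block : List Char) : Nat :=
  block.foldl (fun v c => 2 * v + (if c == 'T' then 1 else 0)) 0

def decodeBlock (block : List Char) : Char :=
  if block.length = 7 ∧ block.all (fun c => c == 'A' || c == 'T') then
    if blkVal block ≤ 126 then Char.ofNat (blkVal block) else '?'
  else '?'

-- the 'for i in range(0, len(encoded_dna), 7)' loop of Source B, appending one char per block
def decode_from_dna_alt (encoded_dna : String) : String :=
  let cs := encoded_dna.toList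
  String.ofList ((PySem.List.pyRange 0 cs.length 7).foldl
    (fun acc i => acc ++ [decodeBlock (PySem.List.slice cs (some i) (some (i + 7)))]) [])

-- ===== PRECONDITION & SPEC =====
def Spec_decode_from_dna (encoded_dna : String) (out : String) : Prop := out = decode_from_dna_alt encoded_dna
instance (encoded_dna : String) (out : String) : Decidable (Spec_decode_from_dna encoded_dna out) := by unfold Spec_decode_from_dna; infer_instance

-- ===== CLAIM (what is proved, stated in full; the proofs are below) =====
def Claim_equal_decode_from_dna : Prop := ∀ (encoded_dna : String), Dom_decode_from_dna encoded_dna → Spec_decode_from_dna encoded_dna (decode_from_dna encoded_dna)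

-- ===== LEMMAS AND PROOFS =====

-- A's DNA sequence for code i
def enc (i : Nat) : List Char := dnaOfBits (binZfill7 i)

-- the per-block value of A's loop body, abstracted
def stepA (b : List Char) : Char :=
  match findChar generate_dna_mapping.items b with
  | some ch => ch
  | none => '?'

set_option maxRecDepth 100000 in
lemma items_eq : generate_dna_mapping.items
    = (List.range 127).map (fun i => (Char.ofNat i, enc i)) := by decide

set_option maxRecDepth 100000 in
lemma enc_good : ∀ i < 127, (enc i).length = 7 ∧
    (enc i).all (fun c => c == 'A' || c == 'T') = true ∧ blkVal (enc i) = i := by decide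

lemma enc_of_good : ∀ (b : List Char), b.length = 7 →
    b.all (fun c => c == 'A' || c == 'T') = true → blkVal b ≤ 126 → enc (blkVal b) = b := by
  intro b hlen hall hv
  match b, hlen with
  | [a, b, c, d, e, f, g], _ =>
    simp only [List.all_cons, List.all_nil, Bool.and_true, Bool.and_eq_true,
      Bool.or_eq_true, beq_iff_eq] at hall
    obtain ⟨ha, hb, hc, hd, he, hf, hg⟩ := hall
    revert hv
    rcases ha with rfl | rfl <;> rcases hb with rfl | rfl <;> rcases hc with rfl | rfl <;>
      rcases hd with rfl | rfl <;> rcases he with rfl | rfl <;> rcases hf with rfl | rfl <;>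
      rcases hg with rfl | rfl <;> decide

lemma findChar_append (l1 l2 : List (Char × List Char)) (b : List Char) :
    findChar (l1 ++ l2) b = (findChar l1 b).or (findChar l2 b) := by
  induction l1 with
  | nil => simp [findChar]
  | cons hd tl ih =>
    obtain ⟨ch, dna⟩ := hd
    by_cases h : dna = b <;> simp [findChar, h, ih]

lemma find_aux : ∀ m, m ≤ 127 → ∀ b : List Char,
    findChar ((List.range m).map (fun i => (Char.ofNat i, enc i))) b
    = if b.length = 7 ∧ b.all (fun c => c == 'A' || c == 'T') = true ∧ blkVal b < m
      then some (Char.ofNat (blkVal b)) else none := by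
  intro m
  induction m with
  | zero => intro _ b; simp [findChar]
  | succ m ih =>
    intro hm b
    rw [List.range_succ, List.map_append, findChar_append, ih (by omega)]
    by_cases hgood : b.length = 7 ∧ b.all (fun c => c == 'A' || c == 'T') = true
    · obtain ⟨h1, h2⟩ := hgood
      by_cases hlt : blkVal b < m
      · have hc1 : b.length = 7 ∧ (b.all fun c => c == 'A' || c == 'T') = true ∧ blkVal b < m :=
          ⟨h1, h2, hlt⟩
        have hc2 : b.length = 7 ∧ (b.all fun c => c == 'A' || c == 'T') = true ∧ blkVal b < m + 1 :=
          ⟨h1, h2, by omega⟩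
        rw [if_pos hc1, if_pos hc2]; rfl
      · rw [if_neg (by tauto)]
        by_cases heq : blkVal b = m
        · have hb : enc m = b := heq ▸ enc_of_good b h1 h2 (by omega)
          have hf1 : findChar [(Char.ofNat m, enc m)] b = some (Char.ofNat m) := by
            simp [findChar, hb]
          have hc2 : b.length = 7 ∧ (b.all fun c => c == 'A' || c == 'T') = true ∧ blkVal b < m + 1 :=
            ⟨h1, h2, by omega⟩
          rw [List.map_cons, List.map_nil, hf1, if_pos hc2, heq]
          rfl
        · have hne : enc m ≠ b := by
            intro h
            exact heq (by rw [← h]; exact (enc_good m (by omega)).2.2)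
          have hf1 : findChar [(Char.ofNat m, enc m)] b = none := by
            simp [findChar, hne]
          rw [List.map_cons, List.map_nil, hf1, if_neg (by rintro ⟨_, _, h⟩; omega)]
          rfl
    · have hne : enc m ≠ b := by
        intro h
        exact hgood ⟨h ▸ (enc_good m (by omega)).1, h ▸ (enc_good m (by omega)).2.1⟩
      have hf1 : findChar [(Char.ofNat m, enc m)] b = none := by
        simp [findChar, hne]
      rw [List.map_cons, List.map_nil, hf1, if_neg (by tauto), if_neg (by tauto)]
      rfl

lemma step_eq (b : List Char) : stepA b = decodeBlock b := by
  unfold stepA decodeBlock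
  rw [items_eq, find_aux 127 le_rfl b]
  by_cases hgood : b.length = 7 ∧ b.all (fun c => c == 'A' || c == 'T') = true
  · obtain ⟨h1, h2⟩ := hgood
    by_cases hv : blkVal b ≤ 126
    · rw [if_pos ⟨h1, h2, by omega⟩, if_pos ⟨h1, h2⟩, if_pos hv]
    · rw [if_neg (by rintro ⟨_, _, h⟩; omega), if_pos ⟨h1, h2⟩, if_neg hv]
  · rw [if_neg (by tauto), if_neg (by tauto)]

-- both loops, abstracted over the per-block function: fold over range(0, len, 7) with
-- 7-character slices is a map over the block indices
lemma fold_blocks (cs : List Char) (f : List Char → Char) :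
    (PySem.List.pyRange 0 cs.length 7).foldl
      (fun acc i => acc ++ [f (PySem.List.slice cs (some i) (some (i + 7)))]) []
    = (List.range ((cs.length + 6) / 7)).map (fun k => f ((cs.drop (7 * k)).take 7)) := by
  rw [PySem.List.pyRange_of_pos 0 cs.length (by norm_num), List.foldl_map]
  have hM : (if (0 : Int) < cs.length then (((cs.length : Int) - 0 + 7 - 1) / 7).toNat else 0)
      = (cs.length + 6) / 7 := by split_ifs <;> omega
  rw [hM]
  have hbody : (fun (acc : List Char) (k : Nat) =>
      acc ++ [f (PySem.List.slice cs (some (0 + 7 * (k : Int))) (some (0 + 7 * (k : Int) + 7)))])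
      = fun acc k => acc ++ [f ((cs.drop (7 * k)).take 7)] := by
    funext acc k
    have h1 : (0 + 7 * (k : Int)) = ((7 * k : Nat) : Int) := by push_cast; ring
    rw [h1]
    have h2 : ((7 * k : Nat) : Int) + 7 = ((7 * k + 7 : Nat) : Int) := by push_cast; ring
    rw [h2, PySem.List.slice_natCast]
    have h3 : 7 * k + 7 - 7 * k = 7 := by omega
    rw [h3]
  rw [hbody, PySem.List.foldl_append_singleton_eq_map, List.nil_append]

lemma A_list (cs : List Char) :
    (PySem.List.pyRange 0 cs.length 7).foldl
      (fun acc i =>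
        match findChar generate_dna_mapping.items (PySem.List.slice cs (some i) (some (i + 7))) with
        | some ch => acc ++ [ch]
        | none => acc ++ ['?']) []
    = (List.range ((cs.length + 6) / 7)).map (fun k => stepA ((cs.drop (7 * k)).take 7)) := by
  have hbody : (fun (acc : List Char) (i : Int) =>
      match findChar generate_dna_mapping.items
        (PySem.List.slice cs (some i) (some (i + 7))) with
      | some ch => acc ++ [ch]
      | none => acc ++ ['?'])
      = fun acc i => acc ++ [stepA (PySem.List.slice cs (some i) (some (i + 7)))] := by
    funext acc i
    unfold stepA
    cases findChar generate_dna_mapping.items (PySem.List.slice cs (some i) (some (i + 7))) <;> rfl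
  rw [hbody, fold_blocks cs stepA]

-- ===== VERDICT (by name: the statement is the Claim_ definition above) =====
set_option maxRecDepth 100000 in
theorem decode_from_dna_spec : Claim_equal_decode_from_dna := by
  intro s _
  show decode_from_dna s = decode_from_dna_alt s
  have hA : decode_from_dna s = String.ofList
      ((PySem.List.pyRange 0 s.toList.length 7).foldl
        (fun acc i =>
          match findChar generate_dna_mapping.items
            (PySem.List.slice s.toList (some i) (some (i + 7))) with
          | some ch => acc ++ [ch]
          | none => acc ++ ['?']) []) := rfl
  have hB : decode_from_dna_alt s = String.ofList
      ((PySem.List.pyRange 0 s.toList.length 7).foldl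
        (fun acc i =>
          acc ++ [decodeBlock (PySem.List.slice s.toList (some i) (some (i + 7)))]) []) := rfl
  rw [hA, hB]
  rw [A_list s.toList, fold_blocks s.toList decodeBlock]
  have hstep : (fun k => stepA (List.take 7 (List.drop (7 * k) s.toList)))
      = (fun k => decodeBlock (List.take 7 (List.drop (7 * k) s.toList))) := by
    funext k; rw [step_eq]
  rw [hstep]
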